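-- pv_equiv track=rewrite | github.com/Velazquezjfp/infobase-ai | backend/tools/form_parser.py | _match_select_option
-- ===== SOURCE A (Python) =====
-- from typing import Dict, List, Any, Optional
--
-- def _match_select_option(value: str, options: List[str]) -> Optional[str]:
--     """
--     Find the best matching option from a select field's options list.
--
--     Uses fuzzy matching to handle case differences and partial matches.
--
--     Args:
--         value: The extracted value to match.
--         options: List of valid option values.
--
--     Returns:
--         Optional[str]: The matched option or None if no match found.
--     """
--     if not value or not options:
--         return None
--
--     value_lower = value.lower().strip()
--
--     # Try exact match first (case-insensitive)
--     for option in options: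
--         if option.lower() == value_lower:
--             return option
--
--     # Try partial match (value contains option or option contains value)
--     for option in options:
--         option_lower = option.lower()
--         if value_lower in option_lower or option_lower in value_lower:
--             return option
--
--     # Try word-based matching (any word in value matches any word in option)
--     value_words = set(value_lower.split())
--     for option in options:
--         option_words = set(option.lower().split())
--         if value_words & option_words:  # Intersection of word sets
--             return option
--
--     return None
-- ===== SOURCE B (Python) =====
-- def _rank(value_lower, value_words, option):
--     option_lower = option.lower()
--     if option_lower == value_lower:
--         return 3
--     if value_lower in option_lower or option_lower in value_lower:
--         return 2
--     if value_words & set(option_lower.split()):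
--         return 1
--     return 0
--
--
-- def _match_select_option(value, options):
--     if not value or not options:
--         return None
--     value_lower = value.lower().strip()
--     value_words = set(value_lower.split())
--     best_rank, best_option = 0, None
--     for option in options:
--         r = _rank(value_lower, value_words, option)
--         if r > best_rank:
--             best_rank, best_option = r, option
--     return best_option
-- ===== Notes on version B (the rewrite author's own statement) =====
-- stated objective: alternative
-- what changed: Replaced A's three sequential find-first scans (exact, partial, word-overlap) by a single pass that assigns each option a rank (3/2/1/0) and keeps the first option of the highest rank via a strict-greater update.
import Mathlib
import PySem

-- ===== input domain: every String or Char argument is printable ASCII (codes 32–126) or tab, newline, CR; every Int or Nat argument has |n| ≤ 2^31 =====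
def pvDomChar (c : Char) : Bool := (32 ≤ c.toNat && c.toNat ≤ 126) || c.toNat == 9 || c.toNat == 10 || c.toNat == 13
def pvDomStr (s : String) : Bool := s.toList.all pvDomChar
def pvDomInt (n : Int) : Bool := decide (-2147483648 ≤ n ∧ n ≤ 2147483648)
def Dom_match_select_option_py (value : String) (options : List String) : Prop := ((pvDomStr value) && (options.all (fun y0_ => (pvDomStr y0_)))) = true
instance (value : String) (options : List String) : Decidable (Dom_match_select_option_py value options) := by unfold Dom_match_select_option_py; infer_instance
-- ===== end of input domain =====

-- B replaces A's three sequential scans by one pass that ranks every option (3 exact / 2 partial / 1 word overlap / 0)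
-- and keeps the first option of the highest rank (objective: alternative decomposition, same cost).

-- ===== PORT A =====
-- A: empty guard, then three find-first scans: exact (case-insensitive), partial (substring either way), word overlap.
def match_select_option_py (value : String) (options : List String) : Option String :=
  if value == "" || options.isEmpty then none
  else
    let value_lower := PySem.Str.strip (PySem.Str.lower value)
    match options.find? (fun option => PySem.Str.lower option == value_lower) with
    | some option => some option
    | none =>
      match options.find? (fun option =>
          PySem.Str.isIn value_lower (PySem.Str.lower option) ||
          PySem.Str.isIn (PySem.Str.lower option) value_lower) with
      | some option => some option
      | none =>
        let value_words := PySem.Set.ofList (PySem.Str.split₀ value_lower)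
        options.find? (fun option =>
          !(PySem.Set.inter value_words (PySem.Set.ofList (PySem.Str.split₀ (PySem.Str.lower option)))).isEmpty)

-- ===== PORT B =====
-- B-side helper: the rank of one option (3 exact, 2 partial, 1 word overlap, 0 none) — Source B's _rank.
def pvRank (value_lower : String) (value_words : PySem.Set String) (option : String) : Nat :=
  if PySem.Str.lower option == value_lower then 3
  else if PySem.Str.isIn value_lower (PySem.Str.lower option) || PySem.Str.isIn (PySem.Str.lower option) value_lower then 2
  else if !(PySem.Set.inter value_words (PySem.Set.ofList (PySem.Str.split₀ (PySem.Str.lower option)))).isEmpty then 1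
  else 0

-- B-side helper: one step of Source B's loop, state = (best_rank, best_option), strict '>' keeps the first winner.
def pvStep (value_lower : String) (value_words : PySem.Set String)
    (st : Nat × Option String) (option : String) : Nat × Option String :=
  let r := pvRank value_lower value_words option
  if r > st.1 then (r, some option) else st

def match_select_option_py_alt (value : String) (options : List String) : Option String :=
  if value == "" || options.isEmpty then none
  else
    let value_lower := PySem.Str.strip (PySem.Str.lower value)
    let value_words := PySem.Set.ofList (PySem.Str.split₀ value_lower)
    (options.foldl (pvStep value_lower value_words) (0, none)).2

-- ===== PRECONDITION & SPEC =====
def Spec_match_select_option_py (value : String) (options : List String) (out : Option String) : Prop := out = match_select_option_py_alt value options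
instance (value : String) (options : List String) (out : Option String) : Decidable (Spec_match_select_option_py value options out) := by unfold Spec_match_select_option_py; infer_instance

-- ===== CLAIM (what is proved, stated in full; the proofs are below) =====
def Claim_equal_match_select_option_py : Prop := ∀ (value : String) (options : List String), Dom_match_select_option_py value options → Spec_match_select_option_py value options (match_select_option_py value options)

-- ===== LEMMAS AND PROOFS =====

theorem pvRank_le_three (vl : String) (vw : PySem.Set String) (o : String) :
    pvRank vl vw o ≤ 3 := by
  unfold pvRank; split_ifs <;> omega

-- find? only looks at members: pointwise-equal predicates agree
theorem pvFind?_ext {α : Type} (p q : α → Bool) (l : List α)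
    (h : ∀ x ∈ l, p x = q x) : l.find? p = l.find? q := by
  induction l with
  | nil => rfl
  | cons a t ih =>
    simp only [List.find?_cons]
    rw [h a (by simp)]
    cases q a <;> simp [ih (fun x hx => h x (by simp [hx]))]

-- once every remaining rank is ≤ the current best, the fold state never changes
theorem pvFold_const (vl : String) (vw : PySem.Set String) (t : List String)
    (b : Nat) (x : Option String) (h : ∀ u ∈ t, pvRank vl vw u ≤ b) :
    t.foldl (pvStep vl vw) (b, x) = (b, x) := by
  induction t with
  | nil => rfl
  | cons a s ih =>
    have ha := h a (by simp)
    simp only [List.foldl_cons, pvStep]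
    rw [if_neg (by omega)]
    exact ih (fun u hu => h u (by simp [hu]))

-- if m bounds every rank and some option reaches m, the fold returns the FIRST such option
theorem pvFold_first_max (vl : String) (vw : PySem.Set String) (os : List String)
    (o : String) (m : Nat) :
    ∀ (b : Nat) (x : Option String), (∀ u ∈ os, pvRank vl vw u ≤ m) → b < m →
    os.find? (fun u => pvRank vl vw u == m) = some o →
    (os.foldl (pvStep vl vw) (b, x)).2 = some o := by
  induction os with
  | nil => intro b x _ _ hfind; simp at hfind
  | cons a t ih =>
    intro b x hm hb hfind
    by_cases ha : pvRank vl vw a = m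
    · have : a = o := by simpa [List.find?_cons, ha] using hfind
      subst this
      simp only [List.foldl_cons, pvStep, ha]
      rw [if_pos (by omega)]
      rw [pvFold_const vl vw t m (some a) (fun u hu => hm u (by simp [hu]))]
    · have hfind' : t.find? (fun u => pvRank vl vw u == m) = some o := by
        simpa [List.find?_cons, ha] using hfind
      have ha' : pvRank vl vw a ≤ m := hm a (by simp)
      simp only [List.foldl_cons, pvStep]
      split_ifs with hgt
      · exact ih (pvRank vl vw a) (some a) (fun u hu => hm u (by simp [hu])) (by omega) hfind'
      · exact ih b x (fun u hu => hm u (by simp [hu])) hb hfind'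

theorem match_select_option_py_equal (value : String) (options : List String) :
    match_select_option_py value options = match_select_option_py_alt value options := by
  unfold match_select_option_py match_select_option_py_alt
  by_cases hguard : (value == "" || options.isEmpty) = true
  · simp [hguard]
  · simp only [hguard]
    set vl := PySem.Str.strip (PySem.Str.lower value) with hvl
    set vw := PySem.Set.ofList (PySem.Str.split₀ vl) with hvw
    -- pass 1
    cases h3 : options.find? (fun option => PySem.Str.lower option == vl) with
    | some o =>
      have hfind : options.find? (fun u => pvRank vl vw u == 3) = some o := by
        rw [← pvFind?_ext _ _ _ (fun u _ => ?_)]; · exact h3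
        unfold pvRank; split_ifs with h <;> simp_all
      exact (pvFold_first_max vl vw options o 3 0 none
        (fun u _ => pvRank_le_three vl vw u) (by omega) hfind).symm
    | none =>
      have hne3 : ∀ u ∈ options, ¬ (PySem.Str.lower u == vl) = true :=
        List.find?_eq_none.mp h3
      have hle2 : ∀ u ∈ options, pvRank vl vw u ≤ 2 := by
        intro u hu
        unfold pvRank
        rw [if_neg (hne3 u hu)]
        split_ifs <;> omega
      -- pass 2
      cases h2 : options.find? (fun option =>
          PySem.Str.isIn vl (PySem.Str.lower option) ||
          PySem.Str.isIn (PySem.Str.lower option) vl) with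
      | some o =>
        have hfind : options.find? (fun u => pvRank vl vw u == 2) = some o := by
          rw [← pvFind?_ext _ _ _ (fun u hu => ?_)]; · exact h2
          unfold pvRank
          rw [if_neg (hne3 u hu)]
          split_ifs with h <;> simp_all
        exact (pvFold_first_max vl vw options o 2 0 none hle2 (by omega) hfind).symm
      | none =>
        have hne2 : ∀ u ∈ options,
            ¬ (PySem.Str.isIn vl (PySem.Str.lower u) ||
               PySem.Str.isIn (PySem.Str.lower u) vl) = true :=
          List.find?_eq_none.mp h2
        have hle1 : ∀ u ∈ options, pvRank vl vw u ≤ 1 := by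
          intro u hu
          unfold pvRank
          rw [if_neg (hne3 u hu), if_neg (hne2 u hu)]
          split_ifs <;> omega
        -- pass 3
        cases h1 : options.find? (fun option =>
            !(PySem.Set.inter vw (PySem.Set.ofList (PySem.Str.split₀ (PySem.Str.lower option)))).isEmpty) with
        | some o =>
          have hfind : options.find? (fun u => pvRank vl vw u == 1) = some o := by
            rw [← pvFind?_ext _ _ _ (fun u hu => ?_)]; · exact h1
            unfold pvRank
            rw [if_neg (hne3 u hu), if_neg (hne2 u hu)]
            split_ifs with h <;> simp_all
          exact (pvFold_first_max vl vw options o 1 0 none hle1 (by omega) hfind).symm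
        | none =>
          have hne1 := List.find?_eq_none.mp h1
          have hzero : ∀ u ∈ options, pvRank vl vw u ≤ 0 := by
            intro u hu
            unfold pvRank
            rw [if_neg (hne3 u hu), if_neg (hne2 u hu), if_neg (hne1 u hu)]
          rw [pvFold_const vl vw options 0 none hzero]

-- ===== VERDICT (by name: the statement is the Claim_ definition above) =====
theorem match_select_option_py_spec : Claim_equal_match_select_option_py := by
  intro value options _
  exact match_select_option_py_equal value options
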